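-- pv_equiv track=rewrite | github.com/eastfar1324/ssu_notice | webcrawling/main.py | split_category_title
-- ===== SOURCE A (Python) =====
-- def split_category_title(whole_title):
--     whole_title = whole_title.strip()
--     square_bracket_positions = []
--     square_bracket_level = 0
--
--     for i in range(len(whole_title)):
--         if square_bracket_level == 0:
--             if whole_title[i] == '[':
--                 square_bracket_positions.append(i)
--                 square_bracket_level += 1
--             elif whole_title[i] == ' ':
--                 continue
--             else:
--                 break
--         else:
--             if whole_title[i] == '[':
--                 square_bracket_level += 1
--             elif whole_title[i] == ']':
--                 square_bracket_level -= 1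
--                 if square_bracket_level == 0:
--                     square_bracket_positions.append(i)
--
--     categories = ''
--     title = ''
--
--     num_of_categories = len(square_bracket_positions) // 2
--
--     if num_of_categories == 0:
--         return categories, whole_title
--     else:
--         for i in range(num_of_categories):
--             square_bracket_start = square_bracket_positions[i * 2]
--             square_bracket_end = square_bracket_positions[i * 2 + 1]
--
--             category = whole_title[square_bracket_start + 1:square_bracket_end].strip()
--             if category not in categories:
--                 categories += category + ' '
--             if i == num_of_categories - 1:
--                 title = whole_title[square_bracket_end + 1:].strip()
--
--         categories = categories.strip()
--
--         return categories, title
-- ===== SOURCE B (Python) =====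
-- def _skip_spaces(s, i):
--     n = len(s)
--     while i < n and s[i] == ' ':
--         i += 1
--     return i
--
--
-- def _find_close(s, i):
--     # s[i-1] was '['; scan with a depth counter; return index one past the
--     # matching ']' or None if the group never closes.
--     n = len(s)
--     depth = 1
--     while i < n:
--         c = s[i]
--         if c == '[':
--             depth += 1
--         elif c == ']':
--             depth -= 1
--             if depth == 0:
--                 return i + 1
--         i += 1
--     return None
--
--
-- def split_category_title(whole_title):
--     s = whole_title.strip()
--     categories = ''
--     last_close = None
--     i = 0
--     while True:
--         j = _skip_spaces(s, i)
--         if j >= len(s) or s[j] != '[':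
--             break
--         k = _find_close(s, j + 1)
--         if k is None:
--             break
--         category = s[j + 1:k - 1].strip()
--         if category not in categories:
--             categories += category + ' '
--         last_close = k - 1
--         i = k
--     if last_close is None:
--         return '', s
--     return categories.strip(), s[last_close + 1:].strip()
-- ===== Notes on version B (the rewrite author's own statement) =====
-- stated objective: alternative
-- what changed: A collects all bracket positions in one indexed scan and then runs a second loop over position pairs slicing out categories; B parses the string in a single pass, skipping spaces and extracting each complete bracket group (depth-counted matching close) as it goes, keeping the same substring-based dedup and drop-unclosed-group behaviour.
import Mathlib
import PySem

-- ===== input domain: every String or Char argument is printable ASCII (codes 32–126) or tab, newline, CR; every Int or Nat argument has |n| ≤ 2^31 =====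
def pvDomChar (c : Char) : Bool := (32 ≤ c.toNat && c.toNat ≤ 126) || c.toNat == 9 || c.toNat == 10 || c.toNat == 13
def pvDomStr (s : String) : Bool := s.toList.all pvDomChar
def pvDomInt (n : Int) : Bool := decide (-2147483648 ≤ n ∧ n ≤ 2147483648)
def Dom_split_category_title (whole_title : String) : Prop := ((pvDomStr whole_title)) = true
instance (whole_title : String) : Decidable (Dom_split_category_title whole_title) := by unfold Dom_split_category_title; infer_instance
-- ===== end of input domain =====

-- B replaces A's two-phase index scan (collect all bracket positions, then a second
-- indexed loop over position pairs) by a single-pass parse of complete bracket groups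
-- (skip spaces, find the matching close with a depth counter, emit the category at once);
-- objective: alternative decomposition, same observable behaviour.

-- ===== PORT A =====
-- the position-collecting scan (A's first for-loop; level 0 vs level>0 branches in order,
-- break = returning the accumulated positions)
def pvScanA : List Char → Nat → Nat → List Nat
  | [], _, _ => []
  | c :: r, i, 0 =>
    if c = '[' then i :: pvScanA r (i + 1) 1
    else if c = ' ' then pvScanA r (i + 1) 0
    else []
  | c :: r, i, (l + 1) =>
    if c = '[' then pvScanA r (i + 1) (l + 2)
    else if c = ']' then
      (if l = 0 then i :: pvScanA r (i + 1) 0 else pvScanA r (i + 1) (l + 1 - 1))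
    else pvScanA r (i + 1) (l + 1)

-- A's second loop over i in range(num): pairs pos[2i], pos[2i+1]; title set on the last i
def pvBuildA (s : List Char) : List Nat → List Char → String × String
  | a :: b :: rest, cats =>
    let category := PySem.Chars.strip (PySem.List.slice s (some ((a : Int) + 1)) (some (b : Int)))
    let cats' := if PySem.Chars.isIn category cats then cats else cats ++ category ++ [' ']
    if 2 ≤ rest.length then pvBuildA s rest cats'
    else (String.ofList (PySem.Chars.strip cats'),
          String.ofList (PySem.Chars.strip (PySem.List.slice s (some ((b : Int) + 1)) none)))
  | _, _ => ("", "")   -- unreachable: pvBuildA is only called with ≥ 2 positions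

def split_category_title (whole_title : String) : String × String :=
  let s := PySem.Chars.strip whole_title.toList
  let pos := pvScanA s 0 0
  if pos.length / 2 = 0 then ("", String.ofList s)
  else pvBuildA s pos []

-- ===== PORT B =====
-- _skip_spaces: advance past spaces, returning the remaining suffix and its index
def pvSkipSp : List Char → Nat → List Char × Nat
  | [], i => ([], i)
  | c :: r, i => if c = ' ' then pvSkipSp r (i + 1) else (c :: r, i)

-- _find_close: depth-counter scan for the matching ']'; returns the suffix one past it and its index
def pvFindClose : List Char → Nat → Nat → Option (List Char × Nat)
  | [], _, _ => none
  | c :: r, i, d =>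
    if c = '[' then pvFindClose r (i + 1) (d + 1)
    else if c = ']' then (if d = 1 then some (r, i + 1) else pvFindClose r (i + 1) (d - 1))
    else pvFindClose r (i + 1) d

-- the code after B's while-loop
def pvFinishB (s : List Char) (cats : List Char) : Option Nat → String × String
  | none => ("", String.ofList s)
  | some b => (String.ofList (PySem.Chars.strip cats),
               String.ofList (PySem.Chars.strip (PySem.List.slice s (some ((b : Int) + 1)) none)))

theorem pvSkipSp_fst_length : ∀ (t : List Char) (i : Nat), (pvSkipSp t i).1.length ≤ t.length := by
  intro t
  induction t with
  | nil => intro i; simp [pvSkipSp]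
  | cons c r ih =>
    intro i
    by_cases hc : c = ' '
    · simpa [pvSkipSp, hc] using Nat.le_succ_of_le (ih (i + 1))
    · simp [pvSkipSp, hc]

theorem pvFindClose_length : ∀ (u : List Char) (i d : Nat) (rest : List Char) (k : Nat),
    pvFindClose u i d = some (rest, k) → rest.length < u.length := by
  intro u
  induction u with
  | nil => intro i d rest k h; simp [pvFindClose] at h
  | cons c r ih =>
    intro i d rest k h
    simp only [pvFindClose] at h
    split_ifs at h with h1 h2 h3
    · exact Nat.lt_succ_of_lt (ih _ _ _ _ h)
    · obtain ⟨rfl, rfl⟩ := Prod.mk.injEq .. ▸ (Option.some.injEq .. ▸ h)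
      simp
    · exact Nat.lt_succ_of_lt (ih _ _ _ _ h)
    · exact Nat.lt_succ_of_lt (ih _ _ _ _ h)

-- B's while-loop: skip spaces, parse one complete group, accumulate, repeat
def pvLoopB (s : List Char) (t : List Char) (i : Nat) (cats : List Char) (lc : Option Nat) :
    String × String :=
  let j := (pvSkipSp t i).2
  match hsk : (pvSkipSp t i).1 with
  | '[' :: u =>
    match hfc : pvFindClose u (j + 1) 1 with
    | some (rest, k) =>
      let category := PySem.Chars.strip (PySem.List.slice s (some ((j : Int) + 1)) (some ((k : Int) - 1)))
      let cats' := if PySem.Chars.isIn category cats then cats else cats ++ category ++ [' ']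
      pvLoopB s rest k cats' (some (k - 1))
    | none => pvFinishB s cats lc
  | _ => pvFinishB s cats lc
termination_by t.length
decreasing_by
  have h1 := pvSkipSp_fst_length t i
  rw [hsk] at h1
  have h2 := pvFindClose_length u (j + 1) 1 rest k hfc
  simp only [List.length_cons] at h1
  omega

def split_category_title_alt (whole_title : String) : String × String :=
  let s := PySem.Chars.strip whole_title.toList
  pvLoopB s s 0 [] none

-- ===== PRECONDITION & SPEC =====
def Spec_split_category_title (whole_title : String) (out : String × String) : Prop := out = split_category_title_alt whole_title
instance (whole_title : String) (out : String × String) : Decidable (Spec_split_category_title whole_title out) := by unfold Spec_split_category_title; infer_instance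

-- ===== CLAIM (what is proved, stated in full; the proofs are below) =====
def Claim_equal_split_category_title : Prop := ∀ (whole_title : String), Dom_split_category_title whole_title → Spec_split_category_title whole_title (split_category_title whole_title)

-- ===== LEMMAS AND PROOFS =====

-- A's pair loop, rephrased to carry the last closing position (bridge shape)
def pvBuildC (s : List Char) : List Nat → List Char → Option Nat → String × String
  | a :: b :: rest, cats, _ =>
    let category := PySem.Chars.strip (PySem.List.slice s (some ((a : Int) + 1)) (some (b : Int)))
    let cats' := if PySem.Chars.isIn category cats then cats else cats ++ category ++ [' ']
    pvBuildC s rest cats' (some b)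
  | _, cats, lc => pvFinishB s cats lc

theorem pvBuildA_eq_buildC (s : List Char) :
    ∀ (n a b : Nat) (rest : List Nat) (cats : List Char) (lc : Option Nat), rest.length ≤ n →
      pvBuildA s (a :: b :: rest) cats = pvBuildC s (a :: b :: rest) cats lc := by
  intro n
  induction n with
  | zero =>
    intro a b rest cats lc hlen
    rw [List.length_eq_zero_iff.mp (Nat.le_zero.mp hlen)]
    simp [pvBuildA, pvBuildC, pvFinishB]
  | succ n ih =>
    intro a b rest cats lc hlen
    match rest with
    | [] => simp [pvBuildA, pvBuildC, pvFinishB]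
    | [x] => simp [pvBuildA, pvBuildC, pvFinishB]
    | a' :: b' :: r' =>
      simp only [pvBuildA, pvBuildC, List.length_cons]
      rw [if_pos (by simp)]
      have hlen' : r'.length ≤ n := by simp only [List.length_cons] at hlen; omega
      exact ih a' b' r' _ (some b) hlen' 

theorem pvSkipSp_scan (t : List Char) : ∀ (i : Nat),
    pvScanA t i 0 = pvScanA (pvSkipSp t i).1 (pvSkipSp t i).2 0 := by
  induction t with
  | nil => intro i; simp [pvSkipSp]
  | cons c r ih =>
    intro i
    by_cases hc : c = ' '
    · simp [pvSkipSp, pvScanA, hc, ih]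
    · simp [pvSkipSp, hc]

theorem pvSkipSp_head : ∀ (t : List Char) (i : Nat) (c : Char) (u : List Char),
    (pvSkipSp t i).1 = c :: u → c ≠ ' ' := by
  intro t
  induction t with
  | nil => intro i c u h; simp [pvSkipSp] at h
  | cons d r ih =>
    intro i c u h
    by_cases hd : d = ' '
    · simp [pvSkipSp, hd] at h; exact ih _ _ _ h
    · simp [pvSkipSp, hd] at h; exact h.1 ▸ hd

theorem pvFindClose_pos : ∀ (u : List Char) (i d : Nat) (rest : List Char) (k : Nat),
    pvFindClose u i d = some (rest, k) → 1 ≤ k := by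
  intro u
  induction u with
  | nil => intro i d rest k h; simp [pvFindClose] at h
  | cons c r ih =>
    intro i d rest k h
    simp only [pvFindClose] at h
    split_ifs at h with h1 h2 h3
    · exact ih _ _ _ _ h
    · obtain ⟨-, rfl⟩ := Prod.mk.injEq .. ▸ (Option.some.injEq .. ▸ h); omega
    · exact ih _ _ _ _ h
    · exact ih _ _ _ _ h

theorem pvScan1_findClose : ∀ (u : List Char) (i d : Nat),
    pvScanA u i (d + 1) =
      (match pvFindClose u i (d + 1) with
       | some (rest, k) => (k - 1) :: pvScanA rest k 0
       | none => []) := by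
  intro u
  induction u with
  | nil => intro i d; simp [pvScanA, pvFindClose]
  | cons c r ih =>
    intro i d
    by_cases h1 : c = '['
    · simpa [pvScanA, pvFindClose, h1] using ih (i + 1) (d + 1)
    · by_cases h2 : c = ']'
      · cases d with
        | zero => simp [pvScanA, pvFindClose, h2]
        | succ d' => simpa [pvScanA, pvFindClose, h1, h2] using ih (i + 1) d'
      · simpa [pvScanA, pvFindClose, h1, h2] using ih (i + 1) d

theorem pvScan_loop (s : List Char) :
    ∀ (n : Nat) (t : List Char), t.length ≤ n → ∀ (i : Nat) (cats : List Char) (lc : Option Nat),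
      pvBuildC s (pvScanA t i 0) cats lc = pvLoopB s t i cats lc := by
  intro n
  induction n with
  | zero =>
    intro t ht i cats lc
    rw [List.length_eq_zero_iff.mp (Nat.le_zero.mp ht), pvLoopB]
    simp [pvSkipSp, pvScanA, pvBuildC]
  | succ n ih =>
    intro t ht i cats lc
    conv_lhs => rw [pvSkipSp_scan t i]
    rw [pvLoopB]
    have ht' : (pvSkipSp t i).1.length ≤ t.length := pvSkipSp_fst_length t i
    split
    next u hsk =>
      conv_lhs => rw [hsk]
      rw [hsk] at ht'
      have hL : pvScanA ('[' :: u) ((pvSkipSp t i).2) 0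
          = (pvSkipSp t i).2 :: pvScanA u ((pvSkipSp t i).2 + 1) 1 := by simp [pvScanA]
      rw [hL]
      split
      · rename_i rest k hfc
        rw [pvScan1_findClose u ((pvSkipSp t i).2 + 1) 0, hfc]
        have hk : 1 ≤ k := pvFindClose_pos u ((pvSkipSp t i).2 + 1) 1 rest k hfc
        have hrest : rest.length < u.length := pvFindClose_length u ((pvSkipSp t i).2 + 1) 1 rest k hfc
        simp only [pvBuildC]
        have hcast : (((k - 1 : Nat) : Int)) = (k : Int) - 1 := by omega
        rw [hcast]
        exact ih rest (by simp only [List.length_cons] at ht'; omega) k _ (some (k - 1))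
      · rename_i hfc
        rw [pvScan1_findClose u ((pvSkipSp t i).2 + 1) 0, hfc]
        simp [pvBuildC]
    next hx =>
      rcases h1 : (pvSkipSp t i).1 with - | ⟨c, u⟩
      · simp [pvScanA, pvBuildC]
      · have hcsp : c ≠ ' ' := pvSkipSp_head t i c u h1
        have hc : c ≠ '[' := fun h => hx u (h ▸ h1)
        have hL : pvScanA (c :: u) ((pvSkipSp t i).2) 0 = [] := by simp [pvScanA, hc, hcsp]
        rw [hL]
        simp [pvBuildC]

-- ===== VERDICT (by name: the statement is the Claim_ definition above) =====
theorem split_category_title_spec : Claim_equal_split_category_title := by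
  intro wt _
  unfold Spec_split_category_title split_category_title split_category_title_alt
  simp only []
  rw [← pvScan_loop (PySem.Chars.strip wt.toList) (PySem.Chars.strip wt.toList).length _ (Nat.le_refl _) 0 [] none]
  rcases hp : pvScanA (PySem.Chars.strip wt.toList) 0 0 with _ | ⟨a, pos1⟩
  · simp [pvBuildC, pvFinishB]
  · rcases pos1 with _ | ⟨b, rest⟩
    · simp [pvBuildC, pvFinishB]
    · rw [if_neg (by simp)]
      exact pvBuildA_eq_buildC _ rest.length a b rest [] none (Nat.le_refl _)
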